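-- pv_equiv track=rewrite | github.com/JakubWorek/introduction_to_computer_science_course | CW4/14.py | convertTab
-- ===== SOURCE A (Python) =====
-- def convertTab(T):
--     N=len(T)
--     ones=[[0 for _ in range(N)] for _ in range(N)]
--     for row in range(N):
--         for col in range(N):
--             num=T[row][col]
--             cntOne=0
--             while(num > 0):
--                 if(num%2==1): cntOne+=1
--                 num//=2
--             ones[row][col]=cntOne
--     return ones
-- ===== SOURCE B (Python) =====
-- def convertTab(T):
--     N = len(T)
--     def pop(num):
--         cnt = 0
--         while num > 0:
--             num &= num - 1
--             cnt += 1
--         return cnt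
--     return [[pop(T[r][c]) for c in range(N)] for r in range(N)]
-- ===== Notes on version B (the rewrite author's own statement) =====
-- stated objective: alternative
-- what changed: Builds the N x N result directly by a nested comprehension instead of mutating a pre-initialized zero matrix, and counts bits with Brian Kernighan's loop (num &= num-1, one iteration per set bit) instead of per-bit halving with num%2 / num//=2.
import Mathlib
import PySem

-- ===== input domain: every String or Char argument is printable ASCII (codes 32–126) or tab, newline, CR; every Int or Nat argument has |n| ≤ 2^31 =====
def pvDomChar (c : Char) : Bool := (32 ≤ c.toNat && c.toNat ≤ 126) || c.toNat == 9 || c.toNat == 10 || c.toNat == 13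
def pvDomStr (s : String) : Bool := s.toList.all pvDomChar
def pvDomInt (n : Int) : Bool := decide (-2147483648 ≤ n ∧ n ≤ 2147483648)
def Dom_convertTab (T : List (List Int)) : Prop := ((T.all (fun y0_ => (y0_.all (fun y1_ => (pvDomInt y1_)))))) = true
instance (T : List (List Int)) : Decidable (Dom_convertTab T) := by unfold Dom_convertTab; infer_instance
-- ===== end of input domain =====

-- B builds the N×N result directly by a nested comprehension (no pre-initialized zero matrix to
-- mutate) and counts bits with Kernighan's loop (num &= num-1): an alternative decomposition.

-- ===== PORT A =====
-- A's inner while loop: cnt of 1-bits by repeated floor-halving (num > 0 guard, num%2, num//=2)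
def pvPopA (num cnt : Int) : Int :=
  if 0 < num then
    pvPopA (PySem.Int.floordiv num 2) (if PySem.Int.mod num 2 = 1 then cnt + 1 else cnt)
  else cnt
termination_by num.toNat
decreasing_by
  rw [PySem.Int.floordiv_eq_ediv_of_pos (by omega)]
  omega

def convertTab (T : List (List Int)) : List (List Int) :=
  let N := T.length
  let ones := List.replicate N (List.replicate N (0 : Int))
  (List.range N).foldl (fun ones row =>
    (List.range N).foldl (fun ones col =>
      -- T[row][col]; exact under Pre_ (square table): both indices in range, otherwise Python raises IndexError (excluded by Pre_)
      ones.modify row (fun r => r.set col (pvPopA ((T.getD row []).getD col 0) 0))) ones) ones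

-- ===== PORT B =====
-- Kernighan loop: clear the lowest set bit each iteration
def pvPopB (num cnt : Int) : Int :=
  if 0 < num then pvPopB (PySem.Int.band num (num - 1)) (cnt + 1) else cnt
termination_by num.toNat
decreasing_by
  rw [PySem.Int.band_of_nonneg (by omega) (by omega)]
  have h := Nat.and_le_right (n := num.toNat) (m := (num - 1).toNat)
  omega

def convertTab_alt (T : List (List Int)) : List (List Int) :=
  -- [[pop(T[r][c]) for c in range(N)] for r in range(N)]; T[r][c] exact under Pre_ (rows ≥ N):
  -- indices in range, otherwise Python raises IndexError (excluded by Pre_)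
  (List.range T.length).map (fun r =>
    (List.range T.length).map (fun c => pvPopB ((T.getD r []).getD c 0) 0))

-- ===== PRECONDITION & SPEC =====
-- Pre_ is exactly A's return domain: if any row is shorter than len(T), A raises IndexError.
def Pre_convertTab (T : List (List Int)) : Prop := ∀ row ∈ T, T.length ≤ row.length
instance (T : List (List Int)) : Decidable (Pre_convertTab T) := by unfold Pre_convertTab; infer_instance
def pvWitness_convertTab : List (List Int) := [[3, 1], [0, 7]]

def Spec_convertTab (T : List (List Int)) (out : List (List Int)) : Prop := out = convertTab_alt T
instance (T : List (List Int)) (out : List (List Int)) : Decidable (Spec_convertTab T out) := by unfold Spec_convertTab; infer_instance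

-- ===== CLAIM (what is proved, stated in full; the proofs are below) =====
def Claim_equal_convertTab : Prop := ∀ (T : List (List Int)), Dom_convertTab T → Pre_convertTab T → Spec_convertTab T (convertTab T)

-- ===== LEMMAS AND PROOFS =====

-- (2k+1) &&& 2k = 2k
lemma land_odd_pred (k : Nat) : (2 * k + 1) &&& (2 * k) = 2 * k := by
  apply Nat.eq_of_testBit_eq
  intro i
  cases i with
  | zero =>
      have h1 : (2 * k + 1) % 2 = 1 := by omega
      have h2 : (2 * k) % 2 = 0 := by omega
      simp [Nat.testBit_zero, h1, h2]
  | succ i =>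
      rw [Nat.testBit_and]
      simp only [Nat.testBit_succ]
      have h1 : (2 * k + 1) / 2 = k := by omega
      have h2 : (2 * k) / 2 = k := by omega
      rw [h1, h2, Bool.and_self]

-- (2k) &&& (2k-1) = 2 (k &&& (k-1)) for k > 0
lemma land_even_pred (k : Nat) (hk : 0 < k) :
    (2 * k) &&& (2 * k - 1) = 2 * (k &&& (k - 1)) := by
  apply Nat.eq_of_testBit_eq
  intro i
  cases i with
  | zero =>
      have h1 : (2 * k) % 2 = 0 := by omega
      have h2 : (2 * (k &&& (k - 1))) % 2 = 0 := by omega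
      simp [Nat.testBit_zero, h1, h2]
  | succ i =>
      rw [Nat.testBit_and]
      simp only [Nat.testBit_succ]
      have h1 : (2 * k) / 2 = k := by omega
      have h2 : (2 * k - 1) / 2 = k - 1 := by omega
      have h3 : (2 * (k &&& (k - 1))) / 2 = k &&& (k - 1) := by omega
      rw [h1, h2, h3, Nat.testBit_and]

-- Kernighan's step removes exactly one set bit (Nat level, via PySem bitCount)
lemma bitCount_land_pred (m : Nat) (hm : 0 < m) :
    PySem.Int.bitCount ((m &&& (m - 1) : Nat) : Int) + 1 = PySem.Int.bitCount (m : Int) := by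
  induction m using Nat.strong_induction_on with
  | _ m ih =>
    rcases Nat.even_or_odd m with ⟨k, hk⟩ | ⟨k, hk⟩
    · -- m = 2k, k > 0
      subst hk
      have hk0 : 0 < k := by omega
      have he : k + k = 2 * k := by ring
      rw [he, land_even_pred k hk0]
      have hcount2k : PySem.Int.bitCount ((2 * k : Nat) : Int) = PySem.Int.bitCount (k : Int) := by
        rw [PySem.Int.bitCount_natCast (by omega)]
        have : (2 * k) / 2 = k := by omega
        simp [this, Nat.mul_mod_right]
      rw [hcount2k]
      by_cases hz : k &&& (k - 1) = 0
      · rw [hz, ← ih k (by omega) hk0, hz]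
      · have hcount2j : PySem.Int.bitCount ((2 * (k &&& (k - 1)) : Nat) : Int)
            = PySem.Int.bitCount ((k &&& (k - 1) : Nat) : Int) := by
          rw [PySem.Int.bitCount_natCast (by omega)]
          have : (2 * (k &&& (k - 1))) / 2 = k &&& (k - 1) := by omega
          simp [this, Nat.mul_mod_right]
        rw [hcount2j, ih k (by omega) hk0]
    · -- m = 2k+1
      subst hk
      have he : 2 * k + 1 - 1 = 2 * k := by omega
      rw [he, land_odd_pred k]
      rw [PySem.Int.bitCount_natCast (m := 2 * k + 1) (by omega)]
      have h1 : (2 * k + 1) % 2 = 1 := by omega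
      have h2 : (2 * k + 1) / 2 = k := by omega
      rw [h1, h2]
      by_cases hk0 : k = 0
      · subst hk0; norm_num
      · have hcount2k : PySem.Int.bitCount ((2 * k : Nat) : Int) = PySem.Int.bitCount (k : Int) := by
          rw [PySem.Int.bitCount_natCast (by omega)]
          have : (2 * k) / 2 = k := by omega
          simp [this, Nat.mul_mod_right]
        rw [hcount2k]; omega

-- A's loop computes cnt + bitCount
lemma pvPopA_eq (num cnt : Int) :
    pvPopA num cnt = if 0 < num then cnt + PySem.Int.bitCount num else cnt := by
  induction num, cnt using pvPopA.induct with
  | case1 num cnt h ih =>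
      simp only [dite_eq_ite] at ih
      rw [pvPopA, if_pos h, ih]
      have hfd : PySem.Int.floordiv num 2 = num / 2 := PySem.Int.floordiv_eq_ediv_of_pos (by omega)
      have hmd : PySem.Int.mod num 2 = num % 2 := PySem.Int.mod_eq_emod_of_pos (by omega)
      rw [PySem.Int.bitCount_of_pos h, hfd, hmd]
      by_cases hp : 0 < num / 2
      · rw [if_pos hp]
        split_ifs with ho <;> [skip; skip] <;> push_cast <;> omega
      · rw [if_neg hp]
        have hz : num / 2 = 0 := by omega
        rw [hz]
        have : PySem.Int.bitCount (0 : Int) = 0 := PySem.Int.bitCount_zero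
        split_ifs with ho <;> simp [this] <;> omega
  | case2 num cnt h => rw [pvPopA, if_neg h, if_neg h]

-- B's loop computes cnt + bitCount
lemma pvPopB_eq (num cnt : Int) :
    pvPopB num cnt = if 0 < num then cnt + PySem.Int.bitCount num else cnt := by
  induction num, cnt using pvPopB.induct with
  | case1 num cnt h ih =>
      rw [pvPopB, if_pos h, ih]
      have hb : PySem.Int.band num (num - 1) = ((num.toNat &&& (num - 1).toNat : Nat) : Int) :=
        PySem.Int.band_of_nonneg (by omega) (by omega)
      have hpred : (num - 1).toNat = num.toNat - 1 := by omega
      have hkern := bitCount_land_pred num.toNat (by omega)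
      have hnum : ((num.toNat : Nat) : Int) = num := by omega
      rw [hnum] at hkern
      rw [hb, hpred]
      by_cases hp : 0 < ((num.toNat &&& (num.toNat - 1) : Nat) : Int)
      · rw [if_pos hp]; omega
      · rw [if_neg hp]
        have hz : (num.toNat &&& (num.toNat - 1) : Nat) = 0 := by omega
        rw [hz] at hkern
        have : PySem.Int.bitCount ((0 : Nat) : Int) = 0 := by norm_num [PySem.Int.bitCount_zero]
        omega
  | case2 num cnt h => rw [pvPopB, if_neg h, if_neg h]

lemma pvPop_eq (num : Int) : pvPopA num 0 = pvPopB num 0 := by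
  rw [pvPopA_eq, pvPopB_eq]

-- list-update helper: modify at the junction index
lemma modify_append_cons {α : Type} (l1 : List α) (x : α) (l2 : List α) (f : α → α) :
    (l1 ++ x :: l2).modify l1.length f = l1 ++ f x :: l2 := by
  induction l1 with
  | nil => rfl
  | cons a t ih =>
      show a :: (t ++ x :: l2).modify t.length f = a :: (t ++ f x :: l2)
      rw [ih]

-- inner fold: setting indices 0..n-1 of a row of length ≥ n
lemma set_fold_eq (f : Nat → Int) :
    ∀ (n : Nat) (r0 : List Int), n ≤ r0.length →
    (List.range n).foldl (fun r col => r.set col (f col)) r0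
      = (List.range n).map f ++ r0.drop n := by
  intro n
  induction n with
  | zero => simp
  | succ n ih =>
      intro r0 hn
      rw [List.range_succ, List.foldl_append, List.map_append, ih r0 (by omega)]
      simp only [List.foldl_cons, List.foldl_nil, List.map_cons, List.map_nil]
      have hd : r0.drop n = r0[n] :: r0.drop (n + 1) :=
        List.drop_eq_getElem_cons (by omega)
      rw [hd]
      have hlen : ((List.range n).map f).length = n := by simp
      rw [List.set_append_right _ _ (by omega), hlen, Nat.sub_self]
      rw [List.set_cons_zero, List.append_assoc]
      rfl

-- folding modify at a fixed index commutes with folding on the row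
lemma foldl_modify_fixed {α : Type} (xs : List α) (row : Nat)
    (step : List Int → α → List Int) :
    ∀ (m0 : List (List Int)),
    xs.foldl (fun m c => m.modify row (fun r => step r c)) m0
      = m0.modify row (fun r => xs.foldl step r) := by
  induction xs with
  | nil => intro m0; exact (List.modify_id row m0).symm
  | cons a t ih =>
      intro m0
      simp only [List.foldl_cons, ih]
      rw [List.modify_modify_eq]
      rfl

-- outer fold: modifying rows 0..n-1 of a matrix of length ≥ n
lemma modify_fold_eq (F : Nat → List Int → List Int) :
    ∀ (n : Nat) (m0 : List (List Int)), n ≤ m0.length →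
    (List.range n).foldl (fun m row => m.modify row (F row)) m0
      = (List.range n).map (fun row => F row (m0.getD row [])) ++ m0.drop n := by
  intro n
  induction n with
  | zero => simp
  | succ n ih =>
      intro m0 hn
      rw [List.range_succ, List.foldl_append, List.map_append, ih m0 (by omega)]
      simp only [List.foldl_cons, List.foldl_nil, List.map_cons, List.map_nil]
      have hd : m0.drop n = m0[n] :: m0.drop (n + 1) :=
        List.drop_eq_getElem_cons (by omega)
      rw [hd]
      have hlen : ((List.range n).map (fun row => F row (m0.getD row []))).length = n := by simp
      have := modify_append_cons ((List.range n).map (fun row => F row (m0.getD row [])))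
        (m0[n]) (m0.drop (n + 1)) (F n)
      rw [hlen] at this
      rw [this]
      have hg : m0.getD n [] = m0[n] := List.getD_eq_getElem m0 [] (by omega)
      rw [← hg]
      simp [List.getD]

-- characterization of A's port: the N×N matrix of per-cell popcounts
lemma convertTab_eq (T : List (List Int)) :
    convertTab T = (List.range T.length).map (fun row =>
      (List.range T.length).map (fun col => pvPopA ((T.getD row []).getD col 0) 0)) := by
  unfold convertTab
  simp only []
  set N := T.length with hN
  -- rewrite inner fold via foldl_modify_fixed
  have hstep : (fun (ones : List (List Int)) (row : Nat) =>
      (List.range N).foldl (fun ones col =>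
        ones.modify row (fun r => r.set col (pvPopA ((T.getD row []).getD col 0) 0))) ones)
      = fun ones row => ones.modify row (fun r =>
          (List.range N).foldl (fun r col => r.set col (pvPopA ((T.getD row []).getD col 0) 0)) r) := by
    funext ones row
    exact foldl_modify_fixed (List.range N) row _ ones
  rw [hstep,
      modify_fold_eq _ N (List.replicate N (List.replicate N (0 : Int))) (by simp)]
  simp only [List.drop_replicate, Nat.sub_self, List.replicate_zero, List.append_nil]
  apply List.map_congr_left
  intro row hrowmem
  have hrowN : row < N := by simpa using List.mem_range.mp hrowmem
  have hrow : (List.replicate N (List.replicate N (0 : Int))).getD row [] = List.replicate N (0 : Int) := by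
    rw [List.getD_eq_getElem _ _ (by simpa using hrowN)]; simp
  rw [hrow, set_fold_eq _ N (List.replicate N (0 : Int)) (by simp)]
  simp only [List.drop_replicate, Nat.sub_self, List.replicate_zero, List.append_nil]

-- ===== VERDICT (by name: the statement is the Claim_ definition above) =====
theorem convertTab_spec : Claim_equal_convertTab := by
  intro T _ _
  unfold Spec_convertTab convertTab_alt
  rw [convertTab_eq]
  simp only [pvPop_eq]
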